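-- pv_equiv track=rewrite | github.com/Praveen4Praveen/LWC_Algos | Tea_modified/tea.py | _str2vec
-- ===== SOURCE A (Python) =====
-- import math
--
-- def _str2vec(value, l=4):
--     """
--     Encodes a binary string as a vector.  The string is split into chunks of length l and each chunk is encoded as 2
--     elements in the return value.
--
--     Compliment of _str2vec.
--
--     :param value:
--         A binary string to encode.
--     :param l:
--         An optional length value of chunks.
--     :return:
--         A vector containing ceil(n / l) elements where n is the length of the value parameter.
--     """
--     n = len(value)
--
--     # Split the string into chunks
--     num_chunks = math.ceil(n / l)
--     chunks = [value[l * i:l * (i + 1)]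
--               for i in range(num_chunks)]
--
--     return [sum([character << 8 * j
--                  for j, character in enumerate(chunk)])
--             for chunk in chunks]
-- ===== SOURCE B (Python) =====
-- def _str2vec(value, l=4):
--     """Single-pass accumulator: stream the characters once, folding each into a
--     running chunk sum and emitting it whenever the chunk boundary is reached."""
--     out = []
--     acc = 0
--     shift = 0
--     for ch in value:
--         acc += ch << shift
--         shift += 8
--         if shift == 8 * l:
--             out.append(acc)
--             acc = 0
--             shift = 0
--     if shift:
--         out.append(acc)
--     return out
-- ===== Notes on version B (the rewrite author's own statement) =====
-- stated objective: alternative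
-- what changed: Replaced the ceil/slice-into-chunks plus nested enumerate-sum comprehensions with a single linear pass that folds each element into a running accumulator and emits it at every chunk boundary (no slicing, no division, no intermediate chunk lists).
-- outside the precondition, e.g. on _str2vec([1, 2], -2): A returns [], B returns [513]
import Mathlib
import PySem

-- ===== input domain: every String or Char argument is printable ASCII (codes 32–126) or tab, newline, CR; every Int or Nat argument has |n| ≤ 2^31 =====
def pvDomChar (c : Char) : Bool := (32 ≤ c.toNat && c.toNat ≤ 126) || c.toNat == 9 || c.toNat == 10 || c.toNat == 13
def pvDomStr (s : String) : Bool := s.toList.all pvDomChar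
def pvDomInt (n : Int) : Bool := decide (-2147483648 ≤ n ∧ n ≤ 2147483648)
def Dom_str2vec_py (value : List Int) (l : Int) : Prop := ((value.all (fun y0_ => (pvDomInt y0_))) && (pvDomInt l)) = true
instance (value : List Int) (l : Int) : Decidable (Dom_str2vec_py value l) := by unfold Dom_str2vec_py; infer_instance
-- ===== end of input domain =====

-- B replaces A's ceil/slice chunking + nested sum comprehensions by one linear
-- accumulator pass over the elements (alternative decomposition, same cost).

-- ===== PORT A =====
-- math.ceil(n / l): for the admitted chunk lengths (1 ≤ l) and list lengths reachable on
-- this domain the float division is exact, so the integer ceiling -((-n) // l) is A's value.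
def str2vec_py (value : List Int) (l : Int) : List Int :=
  let n : Int := value.length
  let numChunks : Int := -(PySem.Int.floordiv (-n) l)
  let chunks : List (List Int) :=
    (PySem.List.pyRange 0 numChunks 1).map
      (fun i => PySem.List.slice value (some (l * i)) (some (l * (i + 1))))
  chunks.map (fun chunk =>
    ((PySem.List.enumerate chunk).map
      (fun jc => jc.2 <<< (8 * jc.1).toNat)).sum)   -- j from enumerate is ≥ 0, so .toNat is exact

-- ===== PORT B =====
-- loop state (out, acc, shift); Python's shift is always a nonnegative multiple of 8,
-- kept as a Nat (ch << shift is ch <<< shift).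
def str2vec_py_alt (value : List Int) (l : Int) : List Int :=
  let fin : List Int × Int × Nat :=
    value.foldl
      (fun (st : List Int × Int × Nat) (ch : Int) =>
        let acc : Int := st.2.1 + ch <<< st.2.2
        let shift : Nat := st.2.2 + 8
        if (shift : Int) = 8 * l then (st.1 ++ [acc], 0, 0) else (st.1, acc, shift))
      ([], 0, 0)
  if fin.2.2 ≠ 0 then fin.1 ++ [fin.2.1] else fin.1

-- ===== PRECONDITION & SPEC =====
-- Pre_ excludes l ≤ 0: for l = 0 A raises ZeroDivisionError, and for l < 0 A's empty result is an
-- accident of the float ceil yielding a nonpositive chunk count, which B's boundary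
-- condition never reproduces (B folds everything into one element there).
def Pre_str2vec_py (value : List Int) (l : Int) : Prop := 1 ≤ l
instance (value : List Int) (l : Int) : Decidable (Pre_str2vec_py value l) := by unfold Pre_str2vec_py; infer_instance
def pvWitness_str2vec_py : List Int × Int := ([1, 2, 3], 2)

def Spec_str2vec_py (value : List Int) (l : Int) (out : List Int) : Prop := out = str2vec_py_alt value l
instance (value : List Int) (l : Int) (out : List Int) : Decidable (Spec_str2vec_py value l out) := by unfold Spec_str2vec_py; infer_instance

-- ===== CLAIM (what is proved, stated in full; the proofs are below) =====
def Claim_equal_str2vec_py : Prop := ∀ (value : List Int) (l : Int), Dom_str2vec_py value l → Pre_str2vec_py value l → Spec_str2vec_py value l (str2vec_py value l)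

-- ===== LEMMAS AND PROOFS =====

-- the per-chunk weighted sum both programs compute, at byte offset k
def gsum : List Int → Nat → Int
  | [], _ => 0
  | c :: cs, k => c <<< (8 * k) + gsum cs (k + 1)


-- B's fold step, named for the proofs (definitionally the lambda in the port)
def stepB (l : Int) (st : List Int × Int × Nat) (ch : Int) : List Int × Int × Nat :=
  let acc : Int := st.2.1 + ch <<< st.2.2
  let shift : Nat := st.2.2 + 8
  if (shift : Int) = 8 * l then (st.1 ++ [acc], 0, 0) else (st.1, acc, shift)

lemma alt_eq (v : List Int) (l : Int) :
    str2vec_py_alt v l =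
      (if (v.foldl (stepB l) ([], 0, 0)).2.2 ≠ 0
       then (v.foldl (stepB l) ([], 0, 0)).1 ++ [(v.foldl (stepB l) ([], 0, 0)).2.1]
       else (v.foldl (stepB l) ([], 0, 0)).1) := rfl

lemma foldB_out (l : Int) (xs : List Int) : ∀ (out : List Int) (acc : Int) (s : Nat),
    xs.foldl (stepB l) (out, acc, s)
      = (out ++ (xs.foldl (stepB l) ([], acc, s)).1, (xs.foldl (stepB l) ([], acc, s)).2) := by
  induction xs with
  | nil => intro out acc s; simp
  | cons c rest ih =>
      intro out acc s
      simp only [List.foldl_cons, stepB]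
      by_cases h : ((s + 8 : Nat) : Int) = 8 * l
      · simp only [h, if_pos]
        rw [ih (out ++ [acc + c <<< s]) 0 0, ih ([] ++ [acc + c <<< s]) 0 0]
        try simp [List.append_assoc]
      · simp only [h, if_neg, not_false_iff]
        rw [ih out (acc + c <<< s) (s + 8), ih [] (acc + c <<< s) (s + 8)]
        try simp

lemma foldB_chunk (l : Int) : ∀ (xs : List Int), xs ≠ [] →
    ∀ (k : Nat) (out : List Int) (acc : Int), (k : Int) + xs.length = l →
    xs.foldl (stepB l) (out, acc, 8 * k) = (out ++ [acc + gsum xs k], 0, 0) := by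
  intro xs
  induction xs with
  | nil => intro h; exact absurd rfl h
  | cons c rest ih =>
      intro _ k out acc hlen
      simp only [List.length_cons] at hlen
      simp only [List.foldl_cons, stepB]
      by_cases hr : rest = []
      · subst hr
        simp only [List.length_nil] at hlen
        have hcond : ((8 * k + 8 : Nat) : Int) = 8 * l := by push_cast; omega
        rw [if_pos hcond]
        simp [gsum]
      · have hrl : 1 ≤ rest.length := List.length_pos_iff.mpr hr
        have hcond : ¬ ((8 * k + 8 : Nat) : Int) = 8 * l := by push_cast; push_cast at hlen; omega
        rw [if_neg hcond]
        have h8 : 8 * k + 8 = 8 * (k + 1) := by ring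
        rw [h8, ih hr (k + 1) out (acc + c <<< (8 * k)) (by push_cast; push_cast at hlen; omega)]
        simp [gsum, add_assoc]

lemma foldB_rest (l : Int) : ∀ (xs : List Int) (k : Nat) (out : List Int) (acc : Int),
    (k : Int) + xs.length < l →
    xs.foldl (stepB l) (out, acc, 8 * k) = (out, acc + gsum xs k, 8 * (k + xs.length)) := by
  intro xs
  induction xs with
  | nil => intro k out acc _; simp [gsum]
  | cons c rest ih =>
      intro k out acc hlen
      simp only [List.length_cons] at hlen
      simp only [List.foldl_cons, stepB]
      have hcond : ¬ ((8 * k + 8 : Nat) : Int) = 8 * l := by push_cast; push_cast at hlen; omega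
      rw [if_neg hcond]
      have h8 : 8 * k + 8 = 8 * (k + 1) := by ring
      rw [h8, ih (k + 1) out (acc + c <<< (8 * k)) (by push_cast; push_cast at hlen; omega)]
      refine congrArg _ ?_
      refine Prod.ext ?_ ?_
      · simp [gsum, add_assoc]
      · simp; ring

lemma B_nil (l : Int) : str2vec_py_alt [] l = [] := rfl

lemma B_cons (l : Int) (hl : 1 ≤ l) (v : List Int) (hv : v ≠ []) :
    str2vec_py_alt v l = gsum (v.take l.toNat) 0 :: str2vec_py_alt (v.drop l.toNat) l := by
  have hL : ((l.toNat : Nat) : Int) = l := Int.toNat_of_nonneg (by omega)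
  rw [alt_eq, alt_eq]
  by_cases hlen : l.toNat ≤ v.length
  · have hsplit : v = v.take l.toNat ++ v.drop l.toNat := (List.take_append_drop _ _).symm
    have htl : (v.take l.toNat).length = l.toNat := List.length_take_of_le hlen
    have htne : v.take l.toNat ≠ [] := by
      intro h; rw [h] at htl; simp at htl; omega
    conv_lhs => rw [hsplit]
    rw [List.foldl_append]
    have hchunk := foldB_chunk l (v.take l.toNat) htne 0 [] 0
      (by rw [htl]; push_cast [hL]; omega)
    simp only [Nat.mul_zero] at hchunk
    rw [hchunk]
    rw [foldB_out l (v.drop l.toNat) ([] ++ [0 + gsum (v.take l.toNat) 0]) 0 0]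
    simp only [List.nil_append, zero_add]
    by_cases hsh : ((v.drop l.toNat).foldl (stepB l) ([], 0, 0)).2.2 ≠ 0
    · rw [if_pos hsh, if_pos hsh]; simp
    · rw [if_neg hsh, if_neg hsh]; simp
  · have hdrop : v.drop l.toNat = [] := List.drop_eq_nil_of_le (by omega)
    have htake : v.take l.toNat = v := List.take_of_length_le (by omega)
    have hrest := foldB_rest l v 0 [] 0 (by push_cast; omega)
    simp only [Nat.mul_zero] at hrest
    rw [hrest]
    have hvlen : 1 ≤ v.length := List.length_pos_iff.mpr hv
    rw [if_pos (by simp; omega)]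
    rw [hdrop, htake]
    simp

lemma esum_gsum : ∀ (cs : List Int) (k : Nat),
    ((PySem.List.enumerate cs ((k : Nat) : Int)).map
      (fun jc => jc.2 <<< (8 * jc.1).toNat)).sum = gsum cs k := by
  intro cs
  induction cs with
  | nil => intro k; simp [PySem.List.enumerate, gsum]
  | cons c rest ih =>
      intro k
      rw [PySem.List.enumerate_cons]
      have hc : ((k : Nat) : Int) + 1 = (((k + 1 : Nat)) : Int) := by push_cast; ring
      have h8 : ((8 : Int) * ((k : Nat) : Int)).toNat = 8 * k := by omega
      simp only [List.map_cons, List.sum_cons, hc, ih (k + 1), gsum, h8]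

lemma A_nil (l : Int) (hl : 1 ≤ l) : str2vec_py [] l = [] := by
  unfold str2vec_py
  simp only [List.length_nil, Nat.cast_zero, neg_zero]
  have h0 : -(PySem.Int.floordiv 0 l) = 0 := by
    rw [PySem.Int.floordiv_eq_ediv_of_pos (by omega)]; simp
  rw [h0, PySem.List.pyRange_zero]
  simp

lemma ceil_succ (l : Int) (hl : 1 ≤ l) (m : Nat) (hm : 1 ≤ m) :
    -(PySem.Int.floordiv (-((m : Nat) : Int)) l)
      = -(PySem.Int.floordiv (-(((m - l.toNat : Nat)) : Int)) l) + 1 := by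
  have hpos : (0 : Int) < l := by omega
  set q' : Int := -(PySem.Int.floordiv (-(((m - l.toNat : Nat)) : Int)) l) with hq'
  have hb := (PySem.Int.neg_floordiv_neg_eq_iff_of_pos hpos).mp hq'.symm
  have hq'0 : 0 ≤ q' := by
    by_contra hneg
    have h1 : q' ≤ -1 := by omega
    have h2 : q' * l ≤ -1 * l := by
      exact mul_le_mul_of_nonneg_right h1 (by omega)
    have h3 : (0 : Int) ≤ ((m - l.toNat : Nat) : Int) := Int.natCast_nonneg _
    nlinarith [hb.2]
  rw [PySem.Int.neg_floordiv_neg_eq_iff_of_pos hpos]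
  by_cases hml : m ≤ l.toNat
  · have hz : ((m - l.toNat : Nat) : Int) = 0 := by omega
    rw [hz] at hb
    have hq0 : q' = 0 := by
      have := hb.1
      have hle : q' - 1 < 0 := by nlinarith
      omega
    rw [hq0]
    constructor
    · have : (0 : Int) < (m : Int) := by omega
      nlinarith
    · have e : ((0 : Int) + 1) * l = l := by ring
      rw [e]; omega
  · have hcast : ((m - l.toNat : Nat) : Int) = (m : Int) - l := by omega
    rw [hcast] at hb
    have e1 : (q' - 1) * l = q' * l - l := by ring
    have e2 : (q' + 1 - 1) * l = q' * l := by ring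
    have e3 : (q' + 1) * l = q' * l + l := by ring
    rw [e1] at hb
    rw [e2, e3]
    omega

lemma ceil_nonneg (l : Int) (hl : 1 ≤ l) (m : Nat) :
    0 ≤ -(PySem.Int.floordiv (-((m : Nat) : Int)) l) := by
  have hpos : (0 : Int) < l := by omega
  set q : Int := -(PySem.Int.floordiv (-((m : Nat) : Int)) l) with hq
  have hb := (PySem.Int.neg_floordiv_neg_eq_iff_of_pos hpos).mp hq.symm
  by_contra hneg
  have h1 : q ≤ -1 := by omega
  have h2 : q * l ≤ -1 * l := mul_le_mul_of_nonneg_right h1 (by omega)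
  have h3 : (0 : Int) ≤ ((m : Nat) : Int) := Int.natCast_nonneg _
  nlinarith [hb.2]

lemma A_cons (l : Int) (hl : 1 ≤ l) (v : List Int) (hv : v ≠ []) :
    str2vec_py v l = gsum (v.take l.toNat) 0 :: str2vec_py (v.drop l.toNat) l := by
  have hL : ((l.toNat : Nat) : Int) = l := Int.toNat_of_nonneg (by omega)
  have hm : 1 ≤ v.length := List.length_pos_iff.mpr hv
  unfold str2vec_py
  simp only [List.map_map, List.length_drop]
  rw [ceil_succ l hl v.length hm]
  set q' : Int := -(PySem.Int.floordiv (-(((v.length - l.toNat : Nat)) : Int)) l) with hq'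
  have hq'0 : 0 ≤ q' := ceil_nonneg l hl (v.length - l.toNat)
  rw [PySem.List.pyRange_zero, PySem.List.pyRange_zero]
  have ht : (q' + 1).toNat = q'.toNat + 1 := by omega
  rw [ht, List.range_succ_eq_map]
  simp only [List.map_cons, List.map_map]
  congr 1
  · -- head chunk: value[l*0 : l*1] is value[:l], then the enumerate-sum is gsum at offset 0
    simp only [Function.comp_apply, Nat.cast_zero, mul_zero, zero_add, mul_one]
    rw [PySem.List.slice_zero_start, PySem.List.slice_to v (by omega : (0:Int) ≤ l)]
    have := esum_gsum (v.take l.toNat) 0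
    simpa using this
  · -- tail chunks: chunk i+1 of value is chunk i of value.drop l
    refine List.map_congr_left ?_
    intro k _
    simp only [Function.comp_apply]
    have hs : PySem.List.slice v (some (l * ((Nat.succ k : Nat) : Int)))
                (some (l * (((Nat.succ k : Nat) : Int) + 1)))
            = PySem.List.slice (v.drop l.toNat) (some (l * ((k : Nat) : Int)))
                (some (l * (((k : Nat) : Int) + 1))) := by
      rw [← hL]
      have c1 : ((l.toNat : Nat) : Int) * ((Nat.succ k : Nat) : Int) = ((l.toNat * (k + 1) : Nat) : Int) := by push_cast; ring
      have c2 : ((l.toNat : Nat) : Int) * (((Nat.succ k : Nat) : Int) + 1) = ((l.toNat * (k + 2) : Nat) : Int) := by push_cast; ring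
      have c3 : ((l.toNat : Nat) : Int) * ((k : Nat) : Int) = ((l.toNat * k : Nat) : Int) := by push_cast; ring
      have c4 : ((l.toNat : Nat) : Int) * (((k : Nat) : Int) + 1) = ((l.toNat * (k + 1) : Nat) : Int) := by push_cast; ring
      rw [c1, c2, c3, c4, PySem.List.slice_natCast, PySem.List.slice_natCast, List.drop_drop]
      have d1 : l.toNat * (k + 2) - l.toNat * (k + 1) = l.toNat := by
        rw [Nat.mul_succ]; omega
      have d2 : l.toNat * (k + 1) - l.toNat * k = l.toNat := by
        rw [Nat.mul_succ]; omega
      have d3 : l.toNat + l.toNat * k = l.toNat * (k + 1) := by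
        rw [Nat.mul_succ]; omega
      rw [d1, d2, Int.toNat_natCast, d3]
    rw [hs]

lemma main_aux : ∀ (n : Nat) (v : List Int) (l : Int), 1 ≤ l → v.length ≤ n →
    str2vec_py v l = str2vec_py_alt v l := by
  intro n
  induction n with
  | zero =>
      intro v l hl hlen
      have hv : v = [] := List.eq_nil_of_length_eq_zero (by omega)
      rw [hv, A_nil l hl, B_nil l]
  | succ n ih =>
      intro v l hl hlen
      by_cases hv : v = []
      · rw [hv, A_nil l hl, B_nil l]
      · rw [A_cons l hl v hv, B_cons l hl v hv]
        have hL1 : 1 ≤ l.toNat := by omega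
        have hvl : 1 ≤ v.length := List.length_pos_iff.mpr hv
        rw [ih (v.drop l.toNat) l hl (by simp [List.length_drop]; omega)]

-- ===== VERDICT (by name: the statements are the Claim_ definitions above) =====
theorem str2vec_py_spec : Claim_equal_str2vec_py := by
  intro v l _ hpre
  unfold Spec_str2vec_py
  exact main_aux v.length v l hpre le_rfl
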